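-- pv_equiv track=rewrite | github.com/Pukk1/networks-lab-1 | methods.py | nrzi
-- ===== SOURCE A (Python) =====
-- def nrzi(input_bin):
--     res = ''
--     prev = '0'
--     for i in input_bin:
--         if i == '1':
--             if prev == '0':
--                 res += '1'
--                 prev = '1'
--             else:
--                 res += '0'
--                 prev = '0'
--         else:
--             res += prev
--     return res
-- ===== SOURCE B (Python) =====
-- def nrzi(input_bin):
--     # Run-length algorithm: split on '1'. Each '1' starts a run whose output
--     # level is the parity of its ordinal among the '1's; the run covers that
--     # '1' and the following stretch of non-'1' characters.
--     parts = input_bin.split('1')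
--     return '0' * len(parts[0]) + ''.join(
--         ('1' if i % 2 else '0') * (1 + len(p))
--         for i, p in enumerate(parts[1:], 1))
-- ===== Notes on version B (the rewrite author's own statement) =====
-- stated objective: faster
-- what changed: B replaces A's per-character state-machine loop with a run-length algorithm: split the input at each one-bit and emit, for the k-th one-bit and its trailing run of other characters, one block of the parity-of-k output character, joined once.
import Mathlib
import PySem

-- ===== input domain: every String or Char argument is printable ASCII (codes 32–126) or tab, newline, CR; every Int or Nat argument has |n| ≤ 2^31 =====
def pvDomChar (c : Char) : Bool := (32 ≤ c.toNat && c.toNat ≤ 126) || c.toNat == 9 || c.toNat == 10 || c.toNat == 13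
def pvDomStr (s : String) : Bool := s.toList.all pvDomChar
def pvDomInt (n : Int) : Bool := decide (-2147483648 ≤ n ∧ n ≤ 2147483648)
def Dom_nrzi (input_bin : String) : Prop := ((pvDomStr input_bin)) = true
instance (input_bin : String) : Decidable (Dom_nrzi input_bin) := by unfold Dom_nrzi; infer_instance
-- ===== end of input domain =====

-- B replaces A's per-character state-machine loop by a run-length algorithm (split at each
-- one-bit, emit one block per piece, join once); same return value, measurably faster in Python
-- (C-level split/join instead of a per-character interpreted loop).

-- ===== PORT A =====
def nrzi (input_bin : String) : String :=
  (input_bin.toList.foldl (fun (st : String × Char) i =>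
      if i == '1' then
        if st.2 == '0' then (st.1.push '1', '1') else (st.1.push '0', '0')
      else (st.1.push st.2, st.2)) ("", '0')).1

-- ===== PORT B =====
def nrzi_alt (input_bin : String) : String :=
  -- 'parts' of Source B inlined (it is used twice); each use is the same splitOn value
  String.ofList
    (List.replicate (PySem.List.pyGetD (PySem.Chars.splitOn input_bin.toList ['1']) 0 []).length '0' ++
      (PySem.List.enumerate
          (PySem.List.slice (PySem.Chars.splitOn input_bin.toList ['1']) (some 1) none) 1).flatMap
        (fun ip =>
          List.replicate (1 + ip.2.length)
            (if PySem.Int.mod ip.1 2 ≠ 0 then '1' else '0')))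

-- ===== PRECONDITION & SPEC =====
def Spec_nrzi (input_bin : String) (out : String) : Prop := out = nrzi_alt input_bin
instance (input_bin : String) (out : String) : Decidable (Spec_nrzi input_bin out) := by unfold Spec_nrzi; infer_instance

-- ===== CLAIM (what is proved, stated in full; the proofs are below) =====
def Claim_equal_nrzi : Prop := ∀ (input_bin : String), Dom_nrzi input_bin → Spec_nrzi input_bin (nrzi input_bin)

-- ===== LEMMAS AND PROOFS =====
def pvBitc (b : Bool) : Char := if b then '1' else '0'

-- structural version of str.split('1'): (first piece, remaining pieces)
def pvSplit1 : List Char → List Char × List (List Char)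
  | [] => ([], [])
  | c :: t =>
      if c = '1' then ([], (pvSplit1 t).1 :: (pvSplit1 t).2)
      else (c :: (pvSplit1 t).1, (pvSplit1 t).2)

-- render the pieces after the first: each starts with a toggled level
def pvRender : List (List Char) → Bool → List Char
  | [], _ => []
  | p :: ps, b => List.replicate (1 + p.length) (pvBitc (!b)) ++ pvRender ps (!b)

lemma pv_push_ofList (l : List Char) (c : Char) :
    (String.ofList l).push c = String.ofList (l ++ [c]) := by
  apply String.toList_injective; simp

lemma pv_splitOn_go (fuel : Nat) (l cur : List Char) (acc : List (List Char))
    (h : l.length < fuel) :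
    PySem.Chars.splitOn.go ['1'] fuel l cur acc
      = acc.reverse ++ (cur.reverse ++ (pvSplit1 l).1) :: (pvSplit1 l).2 := by
  induction fuel generalizing l cur acc with
  | zero => omega
  | succ fuel ih =>
    cases l with
    | nil => simp [PySem.Chars.splitOn.go, pvSplit1]
    | cons c t =>
      by_cases hc : c = '1'
      · subst hc
        have hpre : List.isPrefixOf ['1'] ('1' :: t) = true := by
          simp [List.isPrefixOf]
        rw [show PySem.Chars.splitOn.go ['1'] (fuel + 1) ('1' :: t) cur acc
              = PySem.Chars.splitOn.go ['1'] fuel (List.drop (['1'] : List Char).length ('1' :: t)) [] (cur.reverse :: acc) by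
            simp [PySem.Chars.splitOn.go, hpre]]
        rw [show List.drop (['1'] : List Char).length ('1' :: t) = t by simp]
        rw [ih t [] (cur.reverse :: acc) (by simpa using h)]
        simp [pvSplit1]
      · have hbc : ('1' == c) = false := beq_eq_false_iff_ne.mpr (fun hce => hc hce.symm)
        have hpre : List.isPrefixOf ['1'] (c :: t) = false := by
          simp [List.isPrefixOf, hbc]
        rw [show PySem.Chars.splitOn.go ['1'] (fuel + 1) (c :: t) cur acc
              = PySem.Chars.splitOn.go ['1'] fuel t (c :: cur) acc by
            simp [PySem.Chars.splitOn.go, hpre]]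
        rw [ih t (c :: cur) acc (by simpa using h)]
        simp [pvSplit1, hc]

lemma pv_splitOn_eq (l : List Char) :
    PySem.Chars.splitOn l ['1'] = ((pvSplit1 l).1 :: (pvSplit1 l).2) := by
  unfold PySem.Chars.splitOn
  rw [pv_splitOn_go (l.length + 1) l [] [] (by omega)]
  simp

lemma nrzi_loop_eq (l : List Char) (acc : List Char) (b : Bool) :
    (l.foldl (fun (st : String × Char) i =>
        if i == '1' then
          if st.2 == '0' then (st.1.push '1', '1') else (st.1.push '0', '0')
        else (st.1.push st.2, st.2)) (String.ofList acc, pvBitc b)).1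
    = String.ofList (acc ++ List.replicate (pvSplit1 l).1.length (pvBitc b)
        ++ pvRender (pvSplit1 l).2 b) := by
  induction l generalizing acc b with
  | nil => simp [pvSplit1, pvRender]
  | cons c t ih =>
    have hstep : ((String.ofList acc).push (pvBitc (xor b (c == '1'))),
        pvBitc (xor b (c == '1')))
        = ((if c == '1' then
              if pvBitc b == '0' then ((String.ofList acc).push '1', '1')
              else ((String.ofList acc).push '0', '0')
            else ((String.ofList acc).push (pvBitc b), pvBitc b)) : String × Char) := by
      by_cases hc : c = '1' <;> (cases b <;> simp [hc, pvBitc])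
    simp only [List.foldl_cons]
    rw [← hstep, pv_push_ofList]
    by_cases hc : c = '1'
    · subst hc
      rw [show (xor b ('1' == '1')) = !b by cases b <;> decide]
      rw [ih (acc ++ [pvBitc (!b)]) (!b)]
      rw [show pvSplit1 ('1' :: t) = ([], (pvSplit1 t).1 :: (pvSplit1 t).2) from by
        simp [pvSplit1]]
      rw [show pvRender ((pvSplit1 t).1 :: (pvSplit1 t).2) b
            = List.replicate (1 + (pvSplit1 t).1.length) (pvBitc (!b))
              ++ pvRender (pvSplit1 t).2 (!b) from rfl]
      rw [List.replicate_add]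
      simp
    · rw [show (xor b (c == '1')) = b by
        cases b <;> simp [hc]]
      rw [ih (acc ++ [pvBitc b]) b]
      simp [pvSplit1, hc, List.replicate_succ]

lemma pv_parity_succ (k : Nat) : decide ((k + 1) % 2 = 1) = !decide (k % 2 = 1) := by
  rcases Nat.mod_two_eq_zero_or_one k with h | h <;> simp [Nat.add_mod, h]

lemma pv_enum_render (ps : List (List Char)) (k : Nat) :
    (PySem.List.enumerate ps ((k : Int) + 1)).flatMap (fun ip =>
        List.replicate (1 + ip.2.length)
          (if PySem.Int.mod ip.1 2 ≠ 0 then '1' else '0'))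
      = pvRender ps (decide (k % 2 = 1)) := by
  induction ps generalizing k with
  | nil => simp [pvRender]
  | cons p ps ih =>
    rw [PySem.List.enumerate_cons, List.flatMap_cons]
    have h1 : ((k : Int) + 1 + 1) = ((k + 1 : Nat) : Int) + 1 := by push_cast; ring
    rw [h1, ih (k + 1), pv_parity_succ]
    have h2 : PySem.Int.mod ((k : Int) + 1) 2 = (((k + 1) % 2 : Nat) : Int) := by
      simp [PySem.Int.mod, Int.fmod_eq_emod]
    have hchar : (if PySem.Int.mod ((k : Int) + 1) 2 ≠ 0 then '1' else '0')
        = pvBitc (!decide (k % 2 = 1)) := by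
      rw [h2]
      rcases Nat.mod_two_eq_zero_or_one (k + 1) with h | h
      · have hk : k % 2 = 1 := by omega
        simp [h, hk, pvBitc]
      · have hk : k % 2 = 0 := by omega
        simp [h, hk, pvBitc]
    rw [hchar]
    simp [pvRender]

-- ===== VERDICT (by name: the statement is the Claim_ definition above) =====
theorem nrzi_spec : Claim_equal_nrzi := by
  intro s _
  unfold Spec_nrzi nrzi nrzi_alt
  refine (nrzi_loop_eq s.toList [] false).trans ?_
  rw [pv_splitOn_eq]
  rw [show PySem.List.pyGetD ((pvSplit1 s.toList).1 :: (pvSplit1 s.toList).2) 0 [] = (pvSplit1 s.toList).1 by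
    simp [PySem.List.pyGetD, PySem.List.pyGet?, PySem.List.pyIdx?]]
  rw [PySem.List.slice_from _ (by omega : (0:Int) ≤ 1)]
  rw [show ((1:Int).toNat) = 1 from rfl]
  rw [show List.drop 1 ((pvSplit1 s.toList).1 :: (pvSplit1 s.toList).2) = (pvSplit1 s.toList).2 from rfl]
  rw [show (1 : Int) = ((0 : Nat) : Int) + 1 by norm_num]
  rw [pv_enum_render]
  simp [pvBitc]
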